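-- pv_equiv track=rewrite | github.com/zmjjmz/prefpy | prefpy/mechanismSTV.py | getWinLoseCandidates
-- ===== SOURCE A (Python) =====
-- def getWinLoseCandidates(candScoreMap, winningQuota):
--     """
--     Returns candidates who gained at least winningQuota worth of votes and
--     those with the least positive number of votes.
--
--     :rtype set<int> winners: The set of candidates who has winningQuota worth
--         of votes this round.
--     :rtype set<int> losers: The set of candidates who has the least positive
--         amount of votes.
--
--     :ivar dict<int, int> candScoremap: A mapping of candidates to their score.
--     :ivar int winningQuota: the amount of votes needed to win a seat
--     """
--     winners, losers = set(), set()
--     lowestScore = winningQuota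
--     for cand,score in candScoreMap.items():
--         if score >= winningQuota:
--             winners.add(cand)
--         elif score < lowestScore and score > 0:
--             lowestScore = score
--             losers = set([cand])
--         elif score == lowestScore:
--             losers.add(cand)
--     return winners, losers
-- ===== SOURCE B (Python) =====
-- def getWinLoseCandidates(candScoreMap, winningQuota):
--     winners = {c for c, s in candScoreMap.items() if s >= winningQuota}
--     positives = [(c, s) for c, s in candScoreMap.items() if 0 < s < winningQuota]
--     if positives:
--         m = min(s for _, s in positives)
--         losers = {c for c, s in positives if s == m}
--     else:
--         losers = set()
--     return winners, losers
-- ===== Notes on version B (the rewrite author's own statement) =====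
-- stated objective: simpler
-- what changed: Replaces A's single stateful pass with a running minimum and loser-set resets by a declarative decomposition: filter the winners directly, collect the positive below-quota entries, take the minimum of their scores, and filter the entries attaining it.
import Mathlib
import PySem

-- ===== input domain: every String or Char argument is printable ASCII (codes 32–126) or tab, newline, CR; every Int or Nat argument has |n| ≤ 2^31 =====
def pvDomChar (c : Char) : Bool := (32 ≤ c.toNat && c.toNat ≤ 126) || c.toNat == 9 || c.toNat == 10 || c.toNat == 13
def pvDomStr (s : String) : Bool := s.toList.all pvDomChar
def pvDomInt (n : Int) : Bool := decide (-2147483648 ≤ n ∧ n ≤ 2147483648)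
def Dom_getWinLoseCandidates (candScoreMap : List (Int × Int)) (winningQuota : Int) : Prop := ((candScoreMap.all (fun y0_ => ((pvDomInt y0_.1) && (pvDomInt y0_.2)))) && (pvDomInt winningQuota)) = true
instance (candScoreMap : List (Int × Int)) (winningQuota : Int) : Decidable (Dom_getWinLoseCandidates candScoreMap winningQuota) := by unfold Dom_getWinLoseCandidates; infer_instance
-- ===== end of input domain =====

-- B replaces A's single stateful running-minimum pass (with loser-set resets) by a
-- declarative filter / min / filter decomposition; objective: simpler.

-- ===== PORT A =====
-- loop body of A's for-loop: state = (winners, losers, lowestScore)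
def pvStepA (winningQuota : Int) (st : PySem.Set Int × PySem.Set Int × Int) (cs : Int × Int) :
    PySem.Set Int × PySem.Set Int × Int :=
  if cs.2 ≥ winningQuota then (PySem.Set.add st.1 cs.1, st.2.1, st.2.2)
  else if cs.2 < st.2.2 ∧ cs.2 > 0 then (st.1, PySem.Set.ofList [cs.1], cs.2)
  else if cs.2 = st.2.2 then (st.1, PySem.Set.add st.2.1 cs.1, st.2.2)
  else st

def getWinLoseCandidates (candScoreMap : List (Int × Int)) (winningQuota : Int) :
    List Int × List Int :=
  let st := candScoreMap.foldl (pvStepA winningQuota)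
    (PySem.Set.empty, PySem.Set.empty, winningQuota)
  (st.1, st.2.1)

-- ===== PORT B =====
def getWinLoseCandidates_alt (candScoreMap : List (Int × Int)) (winningQuota : Int) :
    List Int × List Int :=
  let winners : PySem.Set Int :=
    PySem.Set.ofList ((candScoreMap.filter (fun cs => decide (cs.2 ≥ winningQuota))).map (·.1))
  let positives :=
    candScoreMap.filter (fun cs => decide (0 < cs.2) && decide (cs.2 < winningQuota))
  let losers : PySem.Set Int :=
    match PySem.List.min? (positives.map (·.2)) (fun s => s) with
    | none => PySem.Set.empty
    | some m => PySem.Set.ofList ((positives.filter (fun cs => decide (cs.2 = m))).map (·.1))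
  (winners, losers)

-- ===== PRECONDITION & SPEC =====
def Spec_getWinLoseCandidates (candScoreMap : List (Int × Int)) (winningQuota : Int)
    (out : List Int × List Int) : Prop :=
  out = getWinLoseCandidates_alt candScoreMap winningQuota

instance (candScoreMap : List (Int × Int)) (winningQuota : Int) (out : List Int × List Int) :
    Decidable (Spec_getWinLoseCandidates candScoreMap winningQuota out) := by
  unfold Spec_getWinLoseCandidates; infer_instance

-- ===== CLAIM (what is proved, stated in full; the proofs are below) =====
def Claim_equal_getWinLoseCandidates : Prop := ∀ (candScoreMap : List (Int × Int)) (winningQuota : Int), Dom_getWinLoseCandidates candScoreMap winningQuota → Spec_getWinLoseCandidates candScoreMap winningQuota (getWinLoseCandidates candScoreMap winningQuota)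

-- ===== LEMMAS AND PROOFS =====

-- positive-and-below-quota test
def pvPosQ (q : Int) (cs : Int × Int) : Bool := decide (0 < cs.2) && decide (cs.2 < q)

-- the running minimum A maintains, as a fold over the filtered scores
def pvLow (q : Int) (l : List (Int × Int)) (low : Int) : Int :=
  ((l.filter (pvPosQ q)).map (·.2)).foldl min low

lemma pvFoldlMin_le (ys : List Int) : ∀ a : Int, ys.foldl min a ≤ a := by
  induction ys with
  | nil => intro a; simp
  | cons y t ih =>
    intro a
    calc (y :: t).foldl min a = t.foldl min (min a y) := rfl
    _ ≤ min a y := ih _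
    _ ≤ a := min_le_left _ _

lemma pvLow_le (q : Int) (l : List (Int × Int)) (low : Int) : pvLow q l low ≤ low :=
  pvFoldlMin_le _ _

lemma pvLow_cons_pos (q : Int) (x : Int × Int) (t : List (Int × Int)) (low : Int)
    (hx : pvPosQ q x = true) : pvLow q (x :: t) low = pvLow q t (min low x.2) := by
  simp [pvLow, hx]

lemma pvLow_cons_neg (q : Int) (x : Int × Int) (t : List (Int × Int)) (low : Int)
    (hx : pvPosQ q x = false) : pvLow q (x :: t) low = pvLow q t low := by
  simp [pvLow, hx]

-- main loop invariant for A's fold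
lemma pvLoopA_inv (q : Int) :
    ∀ (l : List (Int × Int)) (W L : PySem.Set Int) (low : Int),
    (low = q ∨ (0 < low ∧ low < q)) →
    l.foldl (pvStepA q) (W, L, low) =
      (PySem.Set.update W ((l.filter (fun cs => decide (cs.2 ≥ q))).map (·.1)),
       PySem.Set.update (if pvLow q l low < low then PySem.Set.empty else L)
         (((l.filter (pvPosQ q)).filter (fun cs => decide (cs.2 = pvLow q l low))).map (·.1)),
       pvLow q l low) := by
  intro l
  induction l with
  | nil =>
    intro W L low _
    simp [pvLow, PySem.Set.update]
  | cons x t ih =>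
    intro W L low hlow
    by_cases hw : x.2 ≥ q
    · -- winner branch
      have hx : pvPosQ q x = false := by
        simp only [pvPosQ, Bool.and_eq_false_iff, decide_eq_false_iff_not]
        right; omega
      have hstep : pvStepA q (W, L, low) x = (PySem.Set.add W x.1, L, low) := by
        simp only [pvStepA]
        rw [if_pos hw]
      have hrec := ih (PySem.Set.add W x.1) L low hlow
      rw [List.foldl_cons, hstep, hrec, pvLow_cons_neg q x t low hx,
        List.filter_cons_of_pos (by simpa using hw), List.filter_cons_of_neg (by simp [hx]),
        List.map_cons]
      rfl
    · by_cases h2 : x.2 < low ∧ x.2 > 0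
      · -- reset branch: new lowest score
        have hx : pvPosQ q x = true := by
          simp only [pvPosQ, Bool.and_eq_true, decide_eq_true_eq]
          omega
        have hstep : pvStepA q (W, L, low) x = (W, PySem.Set.ofList [x.1], x.2) := by
          simp only [pvStepA]
          rw [if_neg hw, if_pos h2]
        have hlow' : x.2 = q ∨ (0 < x.2 ∧ x.2 < q) := by omega
        have hrec := ih W (PySem.Set.ofList [x.1]) x.2 hlow'
        have hnl : pvLow q (x :: t) low = pvLow q t x.2 := by
          rw [pvLow_cons_pos q x t low hx]
          congr 1
          omega
        have hle : pvLow q t x.2 ≤ x.2 := pvLow_le q t x.2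
        rw [List.foldl_cons, hstep, hrec, hnl,
          List.filter_cons_of_neg (by simp; omega), List.filter_cons_of_pos hx]
        refine Prod.ext rfl (Prod.ext ?_ rfl)
        by_cases hres : pvLow q t x.2 < x.2
        · -- the minimum drops again later: x is not a loser
          have hlt : pvLow q t x.2 < low := by omega
          rw [List.filter_cons_of_neg (by simp; omega), if_pos hres, if_pos hlt]
        · -- x.2 is the final minimum
          have heq : pvLow q t x.2 = x.2 := le_antisymm hle (by omega)
          have hlt : pvLow q t x.2 < low := by omega
          rw [List.filter_cons_of_pos (by simp [heq]), if_neg hres, if_pos hlt, List.map_cons]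
          simp [PySem.Set.update, PySem.Set.ofList]
      · by_cases h3 : x.2 = low
        · -- equal-to-lowest branch
          have hql : 0 < low ∧ low < q := by
            rcases hlow with h | h
            · exfalso; omega
            · exact h
          have hx : pvPosQ q x = true := by
            simp only [pvPosQ, Bool.and_eq_true, decide_eq_true_eq]
            omega
          have hstep : pvStepA q (W, L, low) x = (W, PySem.Set.add L x.1, low) := by
            simp only [pvStepA]
            rw [if_neg hw, if_neg h2, if_pos h3]
          have hrec := ih W (PySem.Set.add L x.1) low hlow
          have hnl : pvLow q (x :: t) low = pvLow q t low := by
            rw [pvLow_cons_pos q x t low hx]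
            congr 1
            omega
          have hle : pvLow q t low ≤ low := pvLow_le q t low
          rw [List.foldl_cons, hstep, hrec, hnl,
            List.filter_cons_of_neg (by simp; omega), List.filter_cons_of_pos hx]
          refine Prod.ext rfl (Prod.ext ?_ rfl)
          by_cases hres : pvLow q t low < low
          · rw [List.filter_cons_of_neg (by simp; omega), if_pos hres, if_pos hres]
          · have heq : pvLow q t low = low := le_antisymm hle (by omega)
            rw [List.filter_cons_of_pos (by simp [heq, h3]), if_neg hres, if_neg hres,
              List.map_cons]
            simp [PySem.Set.update]
        · -- no branch fires
          have hstep : pvStepA q (W, L, low) x = (W, L, low) := by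
            simp only [pvStepA]
            rw [if_neg hw, if_neg h2, if_neg h3]
          have hrec := ih W L low hlow
          by_cases hx : pvPosQ q x = true
          · -- x positive and below quota, but above the current lowest
            have hgt : low < x.2 := by
              simp only [pvPosQ, Bool.and_eq_true, decide_eq_true_eq] at hx
              omega
            have hnl : pvLow q (x :: t) low = pvLow q t low := by
              rw [pvLow_cons_pos q x t low hx]
              congr 1
              omega
            have hle : pvLow q t low ≤ low := pvLow_le q t low
            rw [List.foldl_cons, hstep, hrec, hnl,
              List.filter_cons_of_neg (by simp; omega), List.filter_cons_of_pos hx,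
              List.filter_cons_of_neg (by simp; omega)]
          · have hx' : pvPosQ q x = false := by simpa using hx
            have hnl : pvLow q (x :: t) low = pvLow q t low := pvLow_cons_neg q x t low hx'
            rw [List.foldl_cons, hstep, hrec, hnl,
              List.filter_cons_of_neg (by simp; omega), List.filter_cons_of_neg (by simp [hx'])]

lemma pvFoldlMin_of_lt (q : Int) :
    ∀ (ys : List Int) (s : Int), (∀ y ∈ ys, y < q) → s < q →
      (s :: ys).foldl min q = ys.foldl min s := by
  intro ys s _ hs
  simp only [List.foldl_cons]
  have : min q s = s := by omega
  rw [this]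

-- ===== VERDICT (by name: the statement is the Claim_ definition above) =====
theorem getWinLoseCandidates_spec : Claim_equal_getWinLoseCandidates := by
  intro m q _
  unfold Spec_getWinLoseCandidates getWinLoseCandidates getWinLoseCandidates_alt
  have h := pvLoopA_inv q m PySem.Set.empty PySem.Set.empty q (Or.inl rfl)
  simp only [h]
  have hfil : m.filter (fun cs => decide (0 < cs.2) && decide (cs.2 < q)) = m.filter (pvPosQ q) := rfl
  rw [hfil]
  refine Prod.ext ?_ ?_
  · simp [PySem.Set.update, PySem.Set.ofList_eq_foldl]
  · -- losers component
    rcases hP : m.filter (pvPosQ q) with _ | ⟨p, rest⟩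
    · simp [pvLow, hP, PySem.Set.update, PySem.List.min?]
    · have hallq : ∀ y ∈ (m.filter (pvPosQ q)).map (·.2), y < q := by
        intro y hy
        simp only [List.mem_map, List.mem_filter, pvPosQ, Bool.and_eq_true,
          decide_eq_true_eq] at hy
        obtain ⟨cs, ⟨_, h1, h2⟩, rfl⟩ := hy
        exact h2
      have hpq : p.2 < q := by
        apply hallq
        simp [hP]
      have hmin' : PySem.List.min? ((p :: rest).map (·.2)) (fun s => s)
          = some ((rest.map (·.2)).foldl min p.2) := by
        simpa using PySem.List.min?_id_cons p.2 (rest.map (·.2))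
      have hlowv : pvLow q m q = (rest.map (·.2)).foldl min p.2 := by
        unfold pvLow
        rw [hP]
        simp only [List.map_cons]
        apply pvFoldlMin_of_lt q (rest.map (·.2)) p.2
        · intro y hy
          apply hallq
          rw [hP]
          simp [hy]
        · exact hpq
      have hlt : pvLow q m q < q := by
        have := pvFoldlMin_le (rest.map (·.2)) p.2
        omega
      rw [if_pos hlt, hmin', ← hlowv]
      simp [PySem.Set.update, PySem.Set.ofList_eq_foldl]
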